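-- pv_equiv track=rewrite | github.com/raphaeltimbo/OpenPulse | data/user_input/project/printMessageInput.py | preprocess_big_strings
-- ===== SOURCE A (Python) =====
-- def preprocess_big_strings(text):
--     message = ""
--     list_words = text.split(" ")
--     for word in list_words:
--         if len(word) > 60:
--             while len(word) > 60:
--                 message += word[0:60] + " "
--                 word = word[60:]
--             message += word + " "
--         else:
--             message += word + " "
--     return message
-- ===== SOURCE B (Python) =====
-- def preprocess_big_strings(text):
--     return "".join(
--         " ".join(word[i:i + 60] for i in range(0, len(word), 60)) + " "
--         for word in text.split(" ")
--     )
-- ===== Notes on version B (the rewrite author's own statement) =====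
-- stated objective: simpler
-- what changed: Replaces the string-consuming while loop (word = word[60:]) and the redundant if/else branch with upfront index-stride slicing: each word's chunks come from range(0, len(word), 60) joined with spaces, and the whole result is one join over the words, avoiding quadratic string re-copying.
import Mathlib
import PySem

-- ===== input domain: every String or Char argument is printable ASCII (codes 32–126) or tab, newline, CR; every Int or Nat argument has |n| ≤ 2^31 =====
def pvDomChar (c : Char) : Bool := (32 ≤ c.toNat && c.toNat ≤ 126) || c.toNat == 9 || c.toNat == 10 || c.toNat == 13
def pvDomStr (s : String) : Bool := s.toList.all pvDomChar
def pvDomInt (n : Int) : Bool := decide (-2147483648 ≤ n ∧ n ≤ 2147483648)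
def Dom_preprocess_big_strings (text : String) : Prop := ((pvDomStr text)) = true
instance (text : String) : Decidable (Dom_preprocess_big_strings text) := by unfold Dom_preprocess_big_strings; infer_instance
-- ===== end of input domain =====

-- B eliminates the redundant if/else and the string-consuming while loop: chunks come
-- from index-stride slicing (range(0, len(word), 60)) joined per word. Objective: simpler.

-- ===== PORT A =====
-- the 'while len(word) > 60' loop: returns (message, word) as they stand when the loop exits
def aWhile (message word : List Char) : List Char × List Char :=
  if _h : 60 < word.length then
    aWhile (message ++ PySem.List.slice word (some 0) (some 60) ++ [' '])
           (PySem.List.slice word (some 60) none)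
  else (message, word)
termination_by word.length
decreasing_by
  rw [PySem.List.slice_from word (by norm_num)]
  simp
  omega

def preprocess_big_strings (text : String) : String :=
  let list_words := PySem.Chars.splitOn text.toList (" ".toList)
  String.ofList (list_words.foldl
    (fun message word =>
      if 60 < word.length then
        let p := aWhile message word
        p.1 ++ p.2 ++ [' ']
      else
        message ++ word ++ [' ']) [])

-- ===== PORT B =====
-- word[i:i+60] for i in range(0, len(word), 60)
def bChunks (word : List Char) : List (List Char) :=
  (PySem.List.pyRange 0 (word.length : Int) 60).map
    (fun i => PySem.List.slice word (some i) (some (i + 60)))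

def preprocess_big_strings_alt (text : String) : String :=
  String.ofList (((PySem.Chars.splitOn text.toList (" ".toList)).map
    (fun word => PySem.Chars.join [' '] (bChunks word) ++ [' '])).flatten)

-- ===== PRECONDITION & SPEC =====
def Spec_preprocess_big_strings (text : String) (out : String) : Prop := out = preprocess_big_strings_alt text
instance (text : String) (out : String) : Decidable (Spec_preprocess_big_strings text out) := by unfold Spec_preprocess_big_strings; infer_instance

-- ===== CLAIM (what is proved, stated in full; the proofs are below) =====
def Claim_equal_preprocess_big_strings : Prop := ∀ (text : String), Dom_preprocess_big_strings text → Spec_preprocess_big_strings text (preprocess_big_strings text)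

-- ===== LEMMAS AND PROOFS =====

-- common reference: the wrapped form of one word (proof-side only)
def gWrap (w : List Char) : List Char :=
  if 60 < w.length then w.take 60 ++ [' '] ++ gWrap (w.drop 60) else w
termination_by w.length
decreasing_by simp; omega

lemma gWrap_of_le (w : List Char) (h : ¬ 60 < w.length) : gWrap w = w := by
  rw [gWrap]; simp [h]

lemma gWrap_of_gt (w : List Char) (h : 60 < w.length) :
    gWrap w = w.take 60 ++ [' '] ++ gWrap (w.drop 60) := by
  rw [gWrap]; simp [h]

-- characterisation of B's chunk list
lemma bChunks_eq (w : List Char) :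
    bChunks w = (List.range ((w.length + 59) / 60)).map
      (fun k => (w.drop (60 * k)).take 60) := by
  unfold bChunks
  rw [PySem.List.pyRange_of_pos 0 (w.length : Int) (by norm_num)]
  have hcnt : (if (0:Int) < (w.length : Int)
      then (((w.length : Int) - 0 + 60 - 1) / 60).toNat else 0) = (w.length + 59) / 60 := by
    rcases Nat.eq_zero_or_pos w.length with h0 | hpos
    · simp [h0]
    · rw [if_pos (by exact_mod_cast hpos)]
      have : ((w.length : Int) - 0 + 60 - 1) = ((w.length + 59 : Nat) : Int) := by push_cast; ring
      rw [this]
      omega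
  rw [hcnt, List.map_map]
  apply List.map_congr_left
  intro k _
  have h1 : (0 + 60 * (k : Int)) = ((60 * k : Nat) : Int) := by push_cast; ring
  have h2 : ((60 * k : Nat) : Int) + 60 = ((60 * k + 60 : Nat) : Int) := by push_cast; ring
  simp only [Function.comp_apply, h1, h2, PySem.List.slice_natCast]
  congr 1
  omega

lemma join_bChunks_aux : ∀ n (w : List Char), w.length ≤ n →
    PySem.Chars.join [' '] (bChunks w) = gWrap w := by
  intro n
  induction n with
  | zero =>
    intro w hw
    have : w = [] := List.eq_nil_of_length_eq_zero (Nat.le_zero.mp hw)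
    subst this
    simp [bChunks_eq, PySem.Chars.join_nil, gWrap_of_le]
  | succ n ih =>
    intro w hw
    by_cases hlen : 60 < w.length
    · -- long word: first chunk is w.take 60, rest are the chunks of w.drop 60
      have hm : (w.length + 59) / 60 = ((w.length - 60) + 59) / 60 + 1 := by omega
      have hdl : (w.drop 60).length = w.length - 60 := by simp
      have htail : bChunks w = w.take 60 :: bChunks (w.drop 60) := by
        rw [bChunks_eq, hm, List.range_succ_eq_map, List.map_cons, List.map_map,
          bChunks_eq, hdl]
        congr 1
        apply List.map_congr_left
        intro k _
        simp only [Function.comp_apply, List.drop_drop]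
        congr 2
        omega
      have hne : bChunks (w.drop 60) ≠ [] := by
        rw [bChunks_eq, hdl]
        simp only [ne_eq, List.map_eq_nil_iff, List.range_eq_nil]
        omega
      obtain ⟨c, rest, hcr⟩ := List.exists_cons_of_ne_nil hne
      rw [htail, hcr, PySem.Chars.join_cons_cons, ← hcr,
        ih (w.drop 60) (by omega), gWrap_of_gt w hlen]
    · -- short word: zero or one chunk
      rcases Nat.eq_zero_or_pos w.length with h0 | hpos
      · have : w = [] := List.eq_nil_of_length_eq_zero h0
        subst this
        simp [bChunks_eq, PySem.Chars.join_nil, gWrap_of_le]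
      · have h1 : (w.length + 59) / 60 = 1 := by omega
        rw [bChunks_eq, h1]
        simp [List.range_succ, List.take_of_length_le (by omega : w.length ≤ 60),
          PySem.Chars.join_singleton, gWrap_of_le w hlen]

lemma join_bChunks (w : List Char) :
    PySem.Chars.join [' '] (bChunks w) = gWrap w :=
  join_bChunks_aux w.length w le_rfl

lemma aWhile_concat_aux : ∀ n (w msg : List Char), w.length ≤ n →
    (aWhile msg w).1 ++ (aWhile msg w).2 = msg ++ gWrap w := by
  intro n
  induction n with
  | zero =>
    intro w msg hw
    have h : ¬ 60 < w.length := by omega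
    rw [aWhile]
    simp [h, gWrap_of_le w h]
  | succ n ih =>
    intro w msg hw
    by_cases h : 60 < w.length
    · rw [aWhile]
      simp only [h, dif_pos]
      have hs60 : PySem.List.slice w (some 60) none = w.drop 60 := by
        rw [PySem.List.slice_from w (by norm_num)]; rfl
      have hs060 : PySem.List.slice w (some 0) (some 60) = w.take 60 := by
        rw [PySem.List.slice_toNat w (by norm_num) (by norm_num)]; rfl
      rw [hs60, hs060, ih (w.drop 60) _ (by simp; omega), gWrap_of_gt w h]
      simp
    · rw [aWhile]
      simp [h, gWrap_of_le w h]

lemma aWhile_concat (w msg : List Char) :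
    (aWhile msg w).1 ++ (aWhile msg w).2 = msg ++ gWrap w :=
  aWhile_concat_aux w.length w msg le_rfl

-- ===== VERDICT (by name: the statement is the Claim_ definition above) =====
theorem preprocess_big_strings_spec : Claim_equal_preprocess_big_strings := by
  intro text _
  unfold Spec_preprocess_big_strings preprocess_big_strings preprocess_big_strings_alt
  dsimp only
  congr 1
  rw [PySem.List.foldl_congr_mem (PySem.Chars.splitOn text.toList (" ".toList)) _
    (fun message word => message ++ (gWrap word ++ [' '])) []
    (by
      intro acc w _
      dsimp only
      by_cases h : 60 < w.length
      · simp only [h, if_pos]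
        rw [← List.append_assoc, aWhile_concat, List.append_assoc]
      · simp [h, gWrap_of_le w h])]
  rw [PySem.List.foldl_append_eq_flatMap]
  simp [List.flatMap_def, join_bChunks]
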